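-- pv_equiv track=rewrite | github.com/sudh29/Greedy | 9_Find_minimum_maximum_amount_to_buy_all_N_candies.py | candyStore
-- ===== SOURCE A (Python) =====
-- def candyStore(candies,N,K):
--     min_val = 0
--     max_val = 0
--     candies.sort()
--     j = N-1
--     m=0
--     n=N-1
--     for i in range(N):
--         if i<=j:
--             min_val+=candies[i]
--             j-=K
--         if m <= n:
--             max_val+=candies[n]
--             m+=K
--             n-=1
--
--     return min_val,max_val
-- ===== SOURCE B (Python) =====
-- def candyStore(candies, N, K):
--     candies.sort()
--     count = max(0, (N + K) // (K + 1))  # ceil(N/(K+1)) = number of candies actually paid for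
--     return sum(candies[:count]), sum(candies[N - count:N])
-- ===== Notes on version B (the rewrite author's own statement) =====
-- stated objective: simpler
-- what changed: Replaces A's N-iteration loop with two index-condition branches and five loop variables by the closed-form paid-candy count ceil(N/(K+1)) = (N+K)//(K+1) and two slice sums over the sorted list.
-- outside the precondition, e.g. on candyStore([1, 2, 3], 3, -1): A returns (6, 6), B raises ZeroDivisionError; on candyStore([1, 2, 3], 3, -2): A returns (6, 6), B returns (0, 0)
import Mathlib
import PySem

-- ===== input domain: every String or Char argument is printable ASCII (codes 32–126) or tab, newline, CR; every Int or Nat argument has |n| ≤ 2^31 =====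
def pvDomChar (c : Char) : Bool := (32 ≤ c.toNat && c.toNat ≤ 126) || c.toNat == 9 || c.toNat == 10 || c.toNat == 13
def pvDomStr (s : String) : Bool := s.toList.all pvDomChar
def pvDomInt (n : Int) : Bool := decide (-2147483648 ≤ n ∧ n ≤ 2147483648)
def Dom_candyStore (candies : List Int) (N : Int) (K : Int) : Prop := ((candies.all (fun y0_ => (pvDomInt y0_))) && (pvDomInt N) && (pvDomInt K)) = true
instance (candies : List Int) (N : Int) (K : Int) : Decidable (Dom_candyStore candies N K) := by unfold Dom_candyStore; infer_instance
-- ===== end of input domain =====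

-- B replaces A's per-index loop by the closed-form count ceil(N/(K+1)) and two slice sums (simpler; equal return values — A sorts `candies` in place and B keeps that mutation).


-- ===== PORT A =====
-- one iteration of A's `for i in range(N)` body over state (min_val, max_val, j, m, n)
def candyStoreStep (s : List Int) (K : Int) (st : Int × Int × Int × Int × Int) (i : Int) :
    Int × Int × Int × Int × Int :=
  let minv := st.1
  let maxv := st.2.1
  let j := st.2.2.1
  let m := st.2.2.2.1
  let n := st.2.2.2.2
  let p1 := if i ≤ j then (minv + PySem.List.pyGetD s i 0, j - K) else (minv, j)
  let p2 := if m ≤ n then (maxv + PySem.List.pyGetD s n 0, m + K, n - 1) else (maxv, m, n)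
  (p1.1, p2.1, p1.2, p2.2.1, p2.2.2)

def candyStore (candies : List Int) (N : Int) (K : Int) : Int × Int :=
  let s := PySem.List.sorted candies (fun x => x) false
  let r := (PySem.List.pyRange 0 N 1).foldl (candyStoreStep s K) (0, 0, N - 1, 0, N - 1)
  (r.1, r.2.1)

-- ===== PORT B =====
def candyStore_alt (candies : List Int) (N : Int) (K : Int) : Int × Int :=
  let s := PySem.List.sorted candies (fun x => x) false
  let count := max 0 (PySem.Int.floordiv (N + K) (K + 1))
  ((PySem.List.slice s none (some count)).sum,
   (PySem.List.slice s (some (N - count)) (some N)).sum)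

-- ===== PRECONDITION & SPEC =====
-- Pre_ excludes N > len(candies), where A raises IndexError, and K < 0, which is outside the
-- task's natural domain (no "every K-th candy free" offer): there A's loop conditions stay
-- vacuously true and it returns (sum, sum) while B divides by K+1.
def Pre_candyStore (candies : List Int) (N : Int) (K : Int) : Prop :=
  0 ≤ K ∧ N ≤ (candies.length : Int)
instance (candies : List Int) (N : Int) (K : Int) : Decidable (Pre_candyStore candies N K) := by
  unfold Pre_candyStore; infer_instance

def pvWitness_candyStore : List Int × Int × Int := ([5, 1, 3, 4, 2], 5, 2)

def Spec_candyStore (candies : List Int) (N : Int) (K : Int) (out : Int × Int) : Prop := out = candyStore_alt candies N K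
instance (candies : List Int) (N : Int) (K : Int) (out : Int × Int) : Decidable (Spec_candyStore candies N K out) := by unfold Spec_candyStore; infer_instance

-- ===== CLAIM (what is proved, stated in full; the proofs are below) =====
def Claim_equal_candyStore : Prop := ∀ (candies : List Int) (N : Int) (K : Int), Dom_candyStore candies N K → Pre_candyStore candies N K → Spec_candyStore candies N K (candyStore candies N K)

-- ===== LEMMAS AND PROOFS =====

-- empty slice xs[a:a]
lemma slice_self_sum (s : List Int) (a : Int) :
    (PySem.List.slice s (some a) (some a)).sum = 0 := by
  have h : (PySem.List.slice s (some a) (some a)).length = 0 := by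
    rw [PySem.List.length_slice]; omega
  rw [List.length_eq_zero_iff.mp h]; rfl

-- loop invariant: after the first t iterations, with c = number of paid candies,
-- the state is (sum of the b smallest, sum of the b largest of the first N, N-1-b*K, b*K, N-1-b)
-- where b = min t c.
lemma candyStore_loop_inv (s : List Int) (K : Int) (hK : 0 ≤ K)
    (NN cN : Nat) (hNL : NN ≤ s.length) (_hcN : cN ≤ NN)
    (hlo : ((cN : Int) - 1) * (K + 1) < (NN : Int)) (hhi : (NN : Int) ≤ (cN : Int) * (K + 1))
    (t : Nat) (ht : t ≤ NN) :
    (PySem.List.pyRange 0 (t : Int) 1).foldl (candyStoreStep s K)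
        (0, 0, (NN : Int) - 1, 0, (NN : Int) - 1)
      = ((s.take (min t cN)).sum,
         ((s.drop (NN - min t cN)).take (min t cN)).sum,
         (NN : Int) - 1 - (min t cN : Nat) * K,
         (min t cN : Nat) * K,
         (NN : Int) - 1 - (min t cN : Nat)) := by
  induction t with
  | zero =>
      simp [PySem.List.pyRange_one_eq_nil]
  | succ t ih =>
      have ht' : t ≤ NN := by omega
      have hsplit : PySem.List.pyRange 0 ((t : Int) + 1) 1
          = PySem.List.pyRange 0 (t : Int) 1 ++ [(t : Int)] :=
        PySem.List.pyRange_one_succ_right (by exact_mod_cast Nat.zero_le t)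
      have hcast : ((t + 1 : Nat) : Int) = (t : Int) + 1 := by push_cast; ring
      rw [hcast, hsplit, List.foldl_append, ih ht']
      simp only [List.foldl_cons, List.foldl_nil]
      by_cases hlt : t < cN
      · -- a paying step: both conditions of the loop body fire
        have hb : min t cN = t := by omega
        have hb1 : min (t + 1) cN = t + 1 := by omega
        have hmul : (t : Int) * (K + 1) ≤ (NN : Int) - 1 := by
          have h1 : (t : Int) ≤ (cN : Int) - 1 := by omega
          nlinarith
        have hcond1 : ((t : Nat) : Int) ≤ (NN : Int) - 1 - (t : Int) * K := by nlinarith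
        have hcond2 : (t : Int) * K ≤ (NN : Int) - 1 - (t : Int) := by nlinarith
        have htlen : t < s.length := by omega
        have hgetmin : PySem.List.pyGetD s ((t : Nat) : Int) 0 = s[t] := by
          rw [PySem.List.pyGetD_natCast]; exact List.getD_eq_getElem s 0 htlen
        have hgetmax : PySem.List.pyGetD s ((NN : Int) - 1 - (t : Int)) 0 = s[NN - 1 - t] := by
          rw [show (NN : Int) - 1 - (t : Int) = ((NN - 1 - t : Nat) : Int) by push_cast; omega,
            PySem.List.pyGetD_natCast]
          exact List.getD_eq_getElem s 0 (by omega)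
        have hdrop : s.drop (NN - (t + 1)) = s[NN - 1 - t] :: s.drop (NN - t) := by
          have h1 : NN - (t + 1) < s.length := by omega
          have := List.drop_eq_getElem_cons h1
          simpa [show NN - (t + 1) = NN - 1 - t by omega, show NN - 1 - t + 1 = NN - t by omega]
            using this
        simp only [candyStoreStep, hb, hb1]
        rw [if_pos hcond1, if_pos hcond2]
        simp only [hgetmin, hgetmax, Prod.mk.injEq]
        refine ⟨?_, ?_, by push_cast; ring, by push_cast; ring, by push_cast; ring⟩
        · rw [List.sum_take_succ s t htlen]
        · rw [hdrop, List.take_succ_cons, List.sum_cons]; ring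
      · -- all paid candies already bought: both conditions are false, state unchanged
        have hb : min t cN = cN := by omega
        have hb1 : min (t + 1) cN = cN := by omega
        have hge : (cN : Int) ≤ (t : Int) := by omega
        have hcond1 : ¬ (((t : Nat) : Int) ≤ (NN : Int) - 1 - (cN : Int) * K) := by nlinarith
        have hcond2 : ¬ ((cN : Int) * K ≤ (NN : Int) - 1 - (cN : Int)) := by nlinarith
        simp only [candyStoreStep, hb, hb1]
        rw [if_neg hcond1, if_neg hcond2]

-- ===== VERDICT (by name: the statement is the Claim_ definition above) =====
theorem candyStore_spec : Claim_equal_candyStore := by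
  intro candies N K _ hpre
  obtain ⟨hK, hNlen⟩ := hpre
  unfold Spec_candyStore candyStore candyStore_alt
  dsimp only
  set s := PySem.List.sorted candies (fun x => x) false with hs
  have hslen : s.length = candies.length := PySem.List.length_sorted ..
  by_cases hN : N ≤ 0
  · -- range(N) is empty and count = 0: both sides return (0, 0)
    have hc : max 0 (PySem.Int.floordiv (N + K) (K + 1)) = 0 := by
      have : PySem.Int.floordiv (N + K) (K + 1) < 1 := by
        rw [PySem.Int.floordiv_lt_iff_lt_mul (show (0:Int) < K + 1 by omega)]; omega
      omega
    rw [PySem.List.pyRange_one_eq_nil hN]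
    simp only [List.foldl_nil, hc, sub_zero]
    rw [PySem.List.slice_to s (by omega : (0:Int) ≤ 0), slice_self_sum]
    simp
  · replace hN : 0 < N := by omega
    set c := PySem.Int.floordiv (N + K) (K + 1) with hc
    have hcval : c * (K + 1) ≤ N + K ∧ N + K < (c + 1) * (K + 1) :=
      (PySem.Int.floordiv_eq_iff_of_pos (show (0:Int) < K + 1 by omega)).mp hc.symm
    have hclo : (c - 1) * (K + 1) < N := by nlinarith [hcval.1, hcval.2]
    have hchi : N ≤ c * (K + 1) := by nlinarith [hcval.1, hcval.2]
    have hcpos : 0 < c := by nlinarith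
    have hcleN : c ≤ N := by nlinarith
    have hmax : max 0 c = c := by omega
    set NN := N.toNat with hNN
    set cN := c.toNat with hcN
    have hNcast : (NN : Int) = N := by omega
    have hccast : (cN : Int) = c := by omega
    have hNL : NN ≤ s.length := by omega
    have hcNle : cN ≤ NN := by omega
    have hinv := candyStore_loop_inv s K hK NN cN hNL hcNle
      (by rw [hccast, hNcast]; exact hclo) (by rw [hccast, hNcast]; exact hchi) NN (le_refl NN)
    rw [hNcast] at hinv
    rw [hinv, hmax]
    have hmin : min NN cN = cN := by omega
    have hNc : N - c = ((NN - cN : Nat) : Int) := by push_cast; omega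
    have hNsum : N = ((NN - cN : Nat) : Int) + (cN : Int) := by push_cast; omega
    rw [hmin, PySem.List.slice_to s (by omega : (0:Int) ≤ c), hNc]
    rw [show (some N : Option Int) = some (((NN - cN : Nat) : Int) + ((cN : Nat) : Int)) by
      rw [← hNsum]]
    rw [PySem.List.slice_natCast_add]
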